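-- pv_equiv track=rewrite | github.com/kosirm/resurrexit-3 | parser/languages/italian/customizations.py | _apply_italian_text_formatting
-- ===== SOURCE A (Python) =====
-- def _apply_italian_text_formatting(text: str, role: str) -> str:
--     """Apply Italian-specific text formatting rules"""
--     if not text:
--         return text
--
--     # Italian rule: All refrains (role A.) should be in uppercase
--     if role == "A.":
--         # Convert to uppercase, but preserve chord markers
--         result = ""
--         i = 0
--         while i < len(text):
--             if text[i] == '[':
--                 # Find the end of the chord marker
--                 end = text.find(']', i)
--                 if end != -1:
--                     # Keep chord marker as-is
--                     result += text[i:end+1]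
--                     i = end + 1
--                 else:
--                     result += text[i].upper()
--                     i += 1
--             else:
--                 result += text[i].upper()
--                 i += 1
--         return result
--
--     # For other roles, keep text as-is
--     return text
-- ===== SOURCE B (Python) =====
-- import re
--
-- def _apply_italian_text_formatting(text: str, role: str) -> str:
--     """Apply Italian-specific text formatting rules"""
--     if not text:
--         return text
--     if role != "A.":
--         return text
--     # split into alternating plain / chord-marker segments; odd indices are markers
--     parts = re.split(r'(\[[^\]]*\])', text)
--     return ''.join(p if i % 2 else p.upper() for i, p in enumerate(parts))
-- ===== Notes on version B (the rewrite author's own statement) =====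
-- stated objective: idiomatic
-- what changed: Replaces A's index-based while loop with str.find and char-by-char string appends by a regex split into alternating plain/chord-marker segments (re.split with a capturing group), uppercasing the even (plain) segments and joining.
import Mathlib
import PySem

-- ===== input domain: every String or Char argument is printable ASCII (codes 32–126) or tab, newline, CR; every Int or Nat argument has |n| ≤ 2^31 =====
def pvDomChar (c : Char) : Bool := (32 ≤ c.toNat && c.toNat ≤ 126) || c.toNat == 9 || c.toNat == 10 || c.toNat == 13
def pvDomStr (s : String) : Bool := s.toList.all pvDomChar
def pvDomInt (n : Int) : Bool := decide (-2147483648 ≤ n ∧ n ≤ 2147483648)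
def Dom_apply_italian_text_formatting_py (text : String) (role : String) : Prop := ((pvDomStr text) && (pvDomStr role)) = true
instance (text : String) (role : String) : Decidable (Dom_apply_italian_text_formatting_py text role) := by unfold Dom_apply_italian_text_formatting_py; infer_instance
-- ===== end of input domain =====

-- B replaces A's index-based while loop (char-by-char append with str.find) by a regex-style
-- split into alternating plain/marker segments that are uppercased or kept wholesale (idiomatic).

-- ===== PORT A =====
-- A's while loop over index i, ported as recursion on the remaining characters with fuel = len - i;
-- 'text.find(']', i) != -1' becomes matching on rest.dropWhile (≠ ']') — its head, when nonempty,
-- is exactly the first ']' at or after i, so 'text[i:end+1]' is '[' ++ takeWhile ++ [']'].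
def pvGoA : Nat → List Char → List Char
  | _, [] => []
  | 0, _ => []
  | fuel+1, c :: rest =>
    if c = '[' then
      match rest.dropWhile (fun x => !(x = ']')) with
      | [] => PySem.Chars.upperChar c :: pvGoA fuel rest          -- end == -1
      | _ :: r => (c :: (rest.takeWhile (fun x => !(x = ']')) ++ [']'])) ++ pvGoA fuel r
    else PySem.Chars.upperChar c :: pvGoA fuel rest

def apply_italian_text_formatting_py (text : String) (role : String) : String :=
  if text = "" then text
  else if role = "A." then String.ofList (pvGoA text.toList.length text.toList)
  else text

-- ===== PORT B =====
-- hand-port of re.split(r'(\[[^\]]*\])', text) (exact: a marker is '[', then non-']' chars, then ']');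
-- it returns alternating plain/marker segments, captured markers at the odd indices; fuel = chars left.
def pvSplitMarkers : Nat → List Char → List Char → List (List Char)
  | _, acc, [] => [acc.reverse]
  | 0, acc, _ => [acc.reverse]
  | fuel+1, acc, c :: t =>
    if c = '[' then
      match t.dropWhile (fun x => !(x = ']')) with
      | [] => pvSplitMarkers fuel (c :: acc) t                    -- no closing ']': not a marker
      | _ :: r => acc.reverse :: ('[' :: (t.takeWhile (fun x => !(x = ']')) ++ [']'])) :: pvSplitMarkers fuel [] r
    else pvSplitMarkers fuel (c :: acc) t

-- ''.join(p if i % 2 else p.upper() for i, p in enumerate(parts))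
def pvJoinParts : Nat → List (List Char) → List Char
  | _, [] => []
  | i, p :: ps => (if i % 2 = 1 then p else PySem.Chars.upper p) ++ pvJoinParts (i+1) ps

def apply_italian_text_formatting_py_alt (text : String) (role : String) : String :=
  if text = "" then text
  else if role ≠ "A." then text
  else String.ofList (pvJoinParts 0 (pvSplitMarkers text.toList.length [] text.toList))

-- ===== PRECONDITION & SPEC =====
def Spec_apply_italian_text_formatting_py (text : String) (role : String) (out : String) : Prop := out = apply_italian_text_formatting_py_alt text role
instance (text : String) (role : String) (out : String) : Decidable (Spec_apply_italian_text_formatting_py text role out) := by unfold Spec_apply_italian_text_formatting_py; infer_instance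

-- ===== CLAIM (what is proved, stated in full; the proofs are below) =====
def Claim_equal_apply_italian_text_formatting_py : Prop := ∀ (text : String) (role : String), Dom_apply_italian_text_formatting_py text role → Spec_apply_italian_text_formatting_py text role (apply_italian_text_formatting_py text role)

-- ===== LEMMAS AND PROOFS =====

-- pvJoinParts only reads the parity of the index
lemma pvJoinParts_parity (ps : List (List Char)) : ∀ i, pvJoinParts (i + 2) ps = pvJoinParts i ps := by
  induction ps with
  | nil => intro i; rfl
  | cons p ps ih =>
    intro i
    simp only [pvJoinParts, Nat.add_mod_right]
    rw [show i + 2 + 1 = (i + 1) + 2 by omega, ih]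

-- the segment decomposition joined with parity-uppercasing equals A's char-by-char loop
lemma pvMain : ∀ (fuel : Nat) (cs acc : List Char), cs.length ≤ fuel →
    pvJoinParts 0 (pvSplitMarkers fuel acc cs) = PySem.Chars.upper acc.reverse ++ pvGoA fuel cs := by
  intro fuel
  induction fuel with
  | zero =>
    intro cs acc h
    have : cs = [] := List.eq_nil_of_length_eq_zero (Nat.le_zero.mp h)
    subst this
    simp [pvSplitMarkers, pvGoA, pvJoinParts]
  | succ fuel ih =>
    intro cs acc h
    cases cs with
    | nil => simp [pvSplitMarkers, pvGoA, pvJoinParts]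
    | cons c t =>
      simp only [List.length_cons, Nat.add_le_add_iff_right] at h
      by_cases hc : c = '['
      · subst hc
        simp only [pvSplitMarkers, pvGoA]
        cases hdrop : t.dropWhile (fun x => !(x = ']')) with
        | nil =>
          simp only [if_true]
          rw [ih t ('[' :: acc) h]
          simp [PySem.Chars.upper]
        | cons x r =>
          have hlen : r.length ≤ fuel := by
            have := List.length_dropWhile_le (fun x => !(x = ']')) t
            rw [hdrop] at this
            simp at this
            omega
          simp only [if_true, pvJoinParts]
          rw [show (0:Nat) + 1 + 1 = 0 + 2 by rfl, pvJoinParts_parity, ih r [] hlen]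
          simp [PySem.Chars.upper]
      · simp only [pvSplitMarkers, pvGoA, if_neg hc]
        rw [ih t (c :: acc) h]
        simp [PySem.Chars.upper]

-- ===== VERDICT (by name: the statement is the Claim_ definition above) =====
theorem apply_italian_text_formatting_py_spec : Claim_equal_apply_italian_text_formatting_py := by
  intro text role _
  unfold Spec_apply_italian_text_formatting_py apply_italian_text_formatting_py apply_italian_text_formatting_py_alt
  by_cases ht : text = ""
  · simp [ht]
  · by_cases hr : role = "A."
    · simp only [ht, hr, ne_eq, not_true_eq_false, ite_false, reduceIte]
      rw [pvMain text.toList.length text.toList [] (le_refl _)]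
      simp [PySem.Chars.upper]
    · simp [ht, hr]
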